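-- pv_equiv track=rewrite | github.com/stverdal/cyclicrefactor | utils/patch_parser.py | extract_json_string_value
-- ===== SOURCE A (Python) =====
-- from typing import Dict, Any, List, Optional, Tuple
--
-- def extract_json_string_value(text: str) -> Optional[str]:
--     """Extract a JSON string value, handling escaped characters.
--
--     Args:
--         text: Text starting at the beginning of a JSON string value (after opening quote)
--
--     Returns:
--         Extracted and unescaped string value, or None if parsing fails
--     """
--     result = []
--     i = 0
--     while i < len(text):
--         char = text[i]
--         if char == '\\' and i + 1 < len(text):
--             # Escaped character
--             next_char = text[i + 1]
--             if next_char == 'n':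
--                 result.append('\n')
--             elif next_char == 't':
--                 result.append('\t')
--             elif next_char == 'r':
--                 result.append('\r')
--             elif next_char == '"':
--                 result.append('"')
--             elif next_char == '\\':
--                 result.append('\\')
--             else:
--                 result.append(next_char)
--             i += 2
--         elif char == '"':
--             # End of string
--             return ''.join(result)
--         else:
--             result.append(char)
--             i += 1
--
--     # Didn't find closing quote - return what we have
--     return ''.join(result) if result else None
-- ===== SOURCE B (Python) =====
-- _ESC = {'n': '\n', 't': '\t', 'r': '\r', '"': '"', '\\': '\\'}
--
--
-- def extract_json_string_value(text):
--     """Chunk-based scan: copy whole runs of plain characters in one slice,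
--     handle the next special character ('"' or '\\') explicitly."""
--     parts = []
--     s = text
--     while s:
--         k = next((i for i, c in enumerate(s) if c == '\\' or c == '"'), len(s))
--         parts.append(s[:k])
--         s = s[k:]
--         if not s:
--             break
--         if s[0] == '"':
--             return ''.join(parts)
--         if len(s) == 1:
--             # lone trailing backslash: kept literally
--             parts.append('\\')
--             s = ''
--         else:
--             parts.append(_ESC.get(s[1], s[1]))
--             s = s[2:]
--     return ''.join(parts) if parts else None
-- ===== Notes on version B (the rewrite author's own statement) =====
-- stated objective: faster
-- what changed: B replaces A's char-by-char index loop (one append and a 5-way if/elif per character) with a chunk-based scan: it finds the next special character ('"' or '\'), copies the whole plain run in one slice, handles that one special character via an escape dict, and joins the collected chunks at the end.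
import Mathlib
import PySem

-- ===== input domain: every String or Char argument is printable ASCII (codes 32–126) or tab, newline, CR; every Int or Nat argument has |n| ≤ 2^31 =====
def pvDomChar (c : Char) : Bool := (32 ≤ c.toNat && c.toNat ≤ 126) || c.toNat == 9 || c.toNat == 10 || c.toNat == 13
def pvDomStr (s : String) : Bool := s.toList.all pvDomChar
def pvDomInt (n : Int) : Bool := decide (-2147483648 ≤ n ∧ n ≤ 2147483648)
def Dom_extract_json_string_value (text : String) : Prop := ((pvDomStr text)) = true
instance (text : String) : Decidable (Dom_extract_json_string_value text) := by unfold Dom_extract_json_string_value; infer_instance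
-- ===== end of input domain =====

-- B re-implements A as a chunk-based scan (copy runs of plain characters in one slice,
-- then handle the next '"'/'\' explicitly) instead of A's char-by-char index loop; measured constant-factor faster.

-- ===== PORT A =====
-- decode of an escaped character, A's if/elif chain
def decodeA (d : Char) : Char :=
  if d = 'n' then '\n'
  else if d = 't' then '\t'
  else if d = 'r' then '\r'
  else if d = '"' then '"'
  else if d = '\\' then '\\'
  else d

-- A's while loop: s = remaining text, acc = result list (reversed)
def goA : List Char → List Char → Option (List Char)
  | [], acc => if acc.isEmpty then none else some acc.reverse
  | [c], acc =>
      -- here i + 1 < len(text) is false, so the backslash branch cannot fire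
      if c = '"' then some acc.reverse else goA [] (c :: acc)
  | c :: d :: rest2, acc =>
      if c = '\\' then goA rest2 (decodeA d :: acc)
      else if c = '"' then some acc.reverse
      else goA (d :: rest2) (c :: acc)

def extract_json_string_value (text : String) : Option String :=
  (goA text.toList []).map String.ofList

-- ===== PORT B =====
-- the _ESC dict of Source B
def escDict : PySem.Dict Char Char :=
  PySem.Dict.ofList [('n', '\n'), ('t', '\t'), ('r', '\r'), ('"', '"'), ('\\', '\\')]

-- final "''.join(parts) if parts else None" (parts accumulated head-first)
def joinOrNone (parts : List (List Char)) : Option String :=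
  if parts.isEmpty then none else some (String.ofList parts.reverse.flatten)

-- B's while loop over the remaining suffix s, parts accumulated head-first
-- (Source B's locals k and the extended parts list are inlined at their use sites)
def goB (s : List Char) (parts : List (List Char)) : Option String :=
  if s.isEmpty then joinOrNone parts
  else
    match h : s.drop (s.findIdx fun c => c = '\\' || c = '"') with
    | [] => joinOrNone (s.take (s.findIdx fun c => c = '\\' || c = '"') :: parts)
    | [c] =>
        if c = '"' then
          some (String.ofList ((s.take (s.findIdx fun c => c = '\\' || c = '"') :: parts).reverse.flatten))
        else joinOrNone (['\\'] :: s.take (s.findIdx fun c => c = '\\' || c = '"') :: parts)   -- lone trailing backslash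
    | c :: d :: rest2 =>
        if c = '"' then
          some (String.ofList ((s.take (s.findIdx fun c => c = '\\' || c = '"') :: parts).reverse.flatten))
        else goB rest2 ([escDict.getD d d] :: s.take (s.findIdx fun c => c = '\\' || c = '"') :: parts)
termination_by s.length
decreasing_by
  have hl := congrArg List.length h
  simp [List.length_drop] at hl
  omega

def extract_json_string_value_alt (text : String) : Option String :=
  goB text.toList []

-- ===== PRECONDITION & SPEC =====
def Spec_extract_json_string_value (text : String) (out : Option String) : Prop := out = extract_json_string_value_alt text
instance (text : String) (out : Option String) : Decidable (Spec_extract_json_string_value text out) := by unfold Spec_extract_json_string_value; infer_instance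

-- ===== CLAIM (what is proved, stated in full; the proofs are below) =====
def Claim_equal_extract_json_string_value : Prop := ∀ (text : String), Dom_extract_json_string_value text → Spec_extract_json_string_value text (extract_json_string_value text)

-- ===== LEMMAS AND PROOFS =====
-- reference unescape function
def unesc : List Char → List Char
  | [] => []
  | [c] => if c = '"' then [] else [c]
  | c :: d :: rest2 =>
      if c = '\\' then decodeA d :: unesc rest2
      else if c = '"' then []
      else c :: unesc (d :: rest2)

theorem escDict_getD (d : Char) : escDict.getD d d = decodeA d := by
  have h : escDict = PySem.Dict.mk [('n', '\n'), ('t', '\t'), ('r', '\r'), ('"', '"'), ('\\', '\\')] := by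
    decide
  rw [PySem.Dict.getD_eq_get?_getD, h]
  by_cases h1 : d = 'n'
  · subst h1; decide
  by_cases h2 : d = 't'
  · subst h2; decide
  by_cases h3 : d = 'r'
  · subst h3; decide
  by_cases h4 : d = '"'
  · subst h4; decide
  by_cases h5 : d = '\\'
  · subst h5; decide
  simp [PySem.Dict.get?_mk_cons, decodeA, h1, h2, h3, h4, h5,
    (Ne.symm h1), (Ne.symm h2), (Ne.symm h3), (Ne.symm h4), (Ne.symm h5)]
  rfl

theorem goA_eq (s : List Char) (acc : List Char) :
    goA s acc = if s = [] ∧ acc = [] then none else some (acc.reverse ++ unesc s) := by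
  induction s, acc using goA.induct with
  | case1 acc h =>
      have : acc = [] := by simpa using h
      subst this
      simp [goA]
  | case2 acc h =>
      have : acc ≠ [] := by simpa using h
      simp [goA, unesc, h, this]
  | case3 acc => simp [goA, unesc]
  | case4 c acc hc ih => simp [goA, unesc, hc]
  | case5 d rest2 acc ih => simp [goA, unesc, ih]
  | case6 d rest2 acc h => simp [goA, unesc]
  | case7 c d rest2 acc h1 h2 ih => simp [goA, unesc, h1, h2, ih]

theorem unesc_cons_plain {c : Char} (h1 : c ≠ '\\') (h2 : c ≠ '"') (u : List Char) :
    unesc (c :: u) = c :: unesc u := by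
  cases u <;> simp [unesc, h1, h2]

theorem unesc_append_plain (pre t : List Char) (h : ∀ c ∈ pre, c ≠ '\\' ∧ c ≠ '"') :
    unesc (pre ++ t) = pre ++ unesc t := by
  induction pre with
  | nil => simp
  | cons c pre ih =>
      have hc := h c (by simp)
      rw [List.cons_append, unesc_cons_plain hc.1 hc.2, ih (fun x hx => h x (by simp [hx]))]
      simp

theorem plain_take (s : List Char) :
    ∀ c ∈ s.take (s.findIdx fun c => c = '\\' || c = '"'), c ≠ '\\' ∧ c ≠ '"' := by
  intro c hc
  have ht : s.takeWhile (fun c => !(c = '\\' || c = '"')) =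
      s.take (s.findIdx fun c => c = '\\' || c = '"') := by
    rw [List.takeWhile_eq_take_findIdx_not]
    simp only [Bool.not_not]
  rw [← ht] at hc
  have hall := List.all_takeWhile (l := s) (p := fun c => !(c = '\\' || c = '"'))
  rw [List.all_eq_true] at hall
  have := hall c hc
  simpa using this

theorem dropWhile_head_false {α : Type} (p : α → Bool) (s : List α) (c : α) (rest : List α)
    (h : s.dropWhile p = c :: rest) : p c = false := by
  induction s generalizing c rest with
  | nil => simp [List.dropWhile] at h
  | cons a t ih =>
      rw [List.dropWhile_cons] at h
      split_ifs at h with hp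
      · exact ih c rest h
      · injection h with h1 h2
        rw [← h1]
        simpa using hp

theorem special_head {s : List Char} {c : Char} {rest : List Char}
    (h : s.drop (s.findIdx fun c => c = '\\' || c = '"') = c :: rest) :
    c = '\\' ∨ c = '"' := by
  have hd : s.dropWhile (fun c => !(c = '\\' || c = '"')) =
      s.drop (s.findIdx fun c => c = '\\' || c = '"') := by
    rw [List.dropWhile_eq_drop_findIdx_not]
    simp only [Bool.not_not]
  have h2 : ¬c = '\\' → c = '"' := by
    simpa using dropWhile_head_false (fun c => !(c = '\\' || c = '"')) s c rest (hd.trans h)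
  by_cases hc : c = '\\'
  · exact Or.inl hc
  · exact Or.inr (h2 hc)

theorem unesc_split (s : List Char) :
    unesc s = s.take (s.findIdx fun c => c = '\\' || c = '"') ++
      unesc (s.drop (s.findIdx fun c => c = '\\' || c = '"')) := by
  conv_lhs => rw [← List.take_append_drop (s.findIdx fun c => c = '\\' || c = '"') s]
  exact unesc_append_plain _ _ (plain_take s)

theorem goB_eq (s : List Char) (parts : List (List Char)) :
    goB s parts = if s = [] ∧ parts = [] then none
                  else some (String.ofList (parts.reverse.flatten ++ unesc s)) := by
  induction s, parts using goB.induct with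
  | case1 s parts hemp =>
      rw [List.isEmpty_iff] at hemp
      subst hemp
      rw [goB]
      cases parts <;> simp [joinOrNone, unesc]
  | case2 s parts hemp hdrop =>
      have hd2 : s.drop (s.findIdx fun c => c = '\\' || c = '"') = [] := hdrop
      have hs : s ≠ [] := by simpa using hemp
      have hu := unesc_split s
      rw [hd2] at hu
      simp [unesc] at hu
      rw [goB, if_neg hemp, hd2]
      simp [joinOrNone, hu, hs]
  | case3 s parts hemp hdrop =>
      have hd2 : s.drop (s.findIdx fun c => c = '\\' || c = '"') = ['"'] := hdrop
      have hs : s ≠ [] := by simpa using hemp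
      have hu := unesc_split s
      rw [hd2] at hu
      simp [unesc] at hu
      rw [goB, if_neg hemp, hd2]
      simp [hu, hs]
  | case4 s parts hemp c hdrop hc =>
      have hd2 : s.drop (s.findIdx fun c => c = '\\' || c = '"') = [c] := hdrop
      have hs : s ≠ [] := by simpa using hemp
      have hb : c = '\\' := by
        rcases special_head hd2 with h | h
        · exact h
        · exact absurd h hc
      subst hb
      have hu := unesc_split s
      rw [hd2] at hu
      simp [unesc] at hu
      rw [goB, if_neg hemp, hd2]
      simp [joinOrNone, hu, hs]
  | case5 s parts hemp d rest2 hdrop =>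
      have hd2 : s.drop (s.findIdx fun c => c = '\\' || c = '"') = '"' :: d :: rest2 := hdrop
      have hs : s ≠ [] := by simpa using hemp
      have hu := unesc_split s
      rw [hd2] at hu
      simp [unesc] at hu
      rw [goB, if_neg hemp, hd2]
      simp [hu, hs]
  | case6 s parts hemp c d rest2 hdrop hc ih =>
      have hd2 : s.drop (s.findIdx fun c => c = '\\' || c = '"') = c :: d :: rest2 := hdrop
      have hs : s ≠ [] := by simpa using hemp
      have hb : c = '\\' := by
        rcases special_head hd2 with h | h
        · exact h
        · exact absurd h hc
      subst hb
      have hu := unesc_split s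
      rw [hd2] at hu
      simp [unesc] at hu
      rw [goB, if_neg hemp, hd2]
      simp only [escDict_getD] at ih ⊢
      simp [ih, hu, hs]

-- ===== VERDICT (by name: the statement is the Claim_ definition above) =====
theorem extract_json_string_value_spec : Claim_equal_extract_json_string_value := by
  intro text _
  unfold Spec_extract_json_string_value extract_json_string_value extract_json_string_value_alt
  rw [goA_eq, goB_eq]
  by_cases h : text.toList = [] <;> simp [h]
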